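-- pv_equiv track=rewrite | github.com/WALEKHWAPHILIP/sa-auto-competition-pulse-pilot | src/news/scrape_news.py | _balanced_page_order
-- ===== SOURCE A (Python) =====
-- from typing import Dict, List, Optional, Set, Tuple
--
-- def _balanced_page_order(low: int, high: int) -> List[int]:
--     """
--     Deterministic balanced order to avoid bias under caps:
--       1, high, 2, high-1, 3, high-2, ...
--     """
--     out: List[int] = []
--     a, b = low, high
--     while a <= b:
--         out.append(a)
--         if b != a:
--             out.append(b)
--         a += 1
--         b -= 1
--     return out
-- ===== SOURCE B (Python) =====
-- from typing import Dict, List, Optional, Set, Tuple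
--
-- def _balanced_page_order(low: int, high: int) -> List[int]:
--     n = max(high - low + 1, 0)
--     return [low + i // 2 if i % 2 == 0 else high - i // 2 for i in range(n)]
-- ===== Notes on version B (the rewrite author's own statement) =====
-- stated objective: alternative
-- what changed: Replaces the two-pointer converge-from-both-ends while loop (mutable a,b state) with a stateless positional construction: a single comprehension over range(n) computing each element in closed form from its index parity.
import Mathlib
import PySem

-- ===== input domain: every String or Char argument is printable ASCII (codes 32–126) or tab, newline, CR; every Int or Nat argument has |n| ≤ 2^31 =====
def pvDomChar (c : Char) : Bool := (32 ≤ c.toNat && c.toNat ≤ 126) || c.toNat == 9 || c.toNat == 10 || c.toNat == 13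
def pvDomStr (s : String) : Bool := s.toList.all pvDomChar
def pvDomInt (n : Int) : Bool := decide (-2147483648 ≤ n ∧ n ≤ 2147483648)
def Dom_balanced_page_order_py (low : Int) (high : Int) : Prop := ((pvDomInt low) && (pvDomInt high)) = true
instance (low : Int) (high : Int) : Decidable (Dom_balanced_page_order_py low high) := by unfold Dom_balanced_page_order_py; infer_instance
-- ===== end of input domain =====

-- B replaces A's two-pointer converge-from-both-ends loop by a stateless positional
-- construction: each element computed in closed form from its index parity (objective: alternative).


-- ===== PORT A =====
-- the while loop: out.append(a); if b != a: out.append(b); a += 1; b -= 1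
def pvLoopA (a b : Int) : List Int :=
  if a ≤ b then
    (a :: (if b ≠ a then [b] else [])) ++ pvLoopA (a + 1) (b - 1)
  else []
termination_by (b - a + 1).toNat
decreasing_by omega

def balanced_page_order_py (low : Int) (high : Int) : List Int := pvLoopA low high

-- ===== PORT B =====
def balanced_page_order_py_alt (low : Int) (high : Int) : List Int :=
  (PySem.List.pyRange 0 (max (high - low + 1) 0) 1).map (fun i =>
    if PySem.Int.mod i 2 = 0 then low + PySem.Int.floordiv i 2
    else high - PySem.Int.floordiv i 2)

-- ===== PRECONDITION & SPEC =====
def Spec_balanced_page_order_py (low : Int) (high : Int) (out : List Int) : Prop := out = balanced_page_order_py_alt low high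
instance (low : Int) (high : Int) (out : List Int) : Decidable (Spec_balanced_page_order_py low high out) := by unfold Spec_balanced_page_order_py; infer_instance

-- ===== CLAIM (what is proved, stated in full; the proofs are below) =====
def Claim_equal_balanced_page_order_py : Prop := ∀ (low : Int) (high : Int), Dom_balanced_page_order_py low high → Spec_balanced_page_order_py low high (balanced_page_order_py low high)

-- ===== LEMMAS AND PROOFS =====

-- B's comprehension, restated over a Nat-length range
def pvG (low high : Int) (n : Nat) : List Int :=
  (List.range n).map (fun i : Nat => if i % 2 = 0 then low + (i / 2 : Nat) else high - (i / 2 : Nat))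

theorem pvAlt_eq_pvG (low high : Int) :
    balanced_page_order_py_alt low high = pvG low high (high - low + 1).toNat := by
  unfold balanced_page_order_py_alt pvG
  rw [PySem.List.pyRange_one]
  have h : (max (high - low + 1) 0 - 0).toNat = (high - low + 1).toNat := by omega
  rw [h, List.map_map]
  refine List.map_congr_left (fun k _ => ?_)
  simp only [Function.comp]
  have hm : PySem.Int.mod (0 + (k : Int)) 2 = ((k % 2 : Nat) : Int) := by
    rw [zero_add]; exact_mod_cast PySem.Int.mod_natCast k 2
  have hd : PySem.Int.floordiv (0 + (k : Int)) 2 = ((k / 2 : Nat) : Int) := by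
    rw [zero_add]; exact_mod_cast PySem.Int.floordiv_natCast k 2
  rw [hm, hd]
  by_cases hk : k % 2 = 0
  · rw [hk]; norm_num
  · have h1 : k % 2 = 1 := by omega
    rw [h1]; norm_num

theorem pvG_zero (low high : Int) : pvG low high 0 = [] := by simp [pvG]

theorem pvG_one (low high : Int) : pvG low high 1 = [low] := by
  simp [pvG, List.range_succ]

theorem pvG_step (low high : Int) (n : Nat) :
    pvG low high (n + 2) = low :: high :: pvG (low + 1) (high - 1) n := by
  unfold pvG
  rw [List.range_succ_eq_map, List.map_cons, List.map_map, List.range_succ_eq_map,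
    List.map_cons, List.map_map]
  refine congrArg₂ List.cons (by norm_num) (congrArg₂ List.cons (by norm_num) ?_)
  refine List.map_congr_left (fun i _ => ?_)
  simp only [Function.comp]
  have h2 : (i + 1 + 1) % 2 = i % 2 := by omega
  have h3 : (i + 1 + 1) / 2 = i / 2 + 1 := by omega
  rw [h2, h3]
  by_cases hk : i % 2 = 0
  · simp only [hk]; push_cast; ring
  · simp only [hk]; push_cast <;> ring

theorem pvLoopA_eq (low high : Int) :
    pvLoopA low high = pvG low high (high - low + 1).toNat := by
  rw [pvLoopA]
  by_cases h : low ≤ high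
  · rw [if_pos h]
    by_cases he : high = low
    · subst he
      rw [if_neg (by simp)]
      have h1 : (high - high + 1).toNat = 1 := by omega
      have h0 : ¬ (high + 1 ≤ high - 1) := by omega
      rw [h1, pvG_one, pvLoopA, if_neg h0]
      simp
    · rw [if_pos he]
      have hlt : low < high := lt_of_le_of_ne h (Ne.symm he)
      have h2 : (high - low + 1).toNat = (high - 1 - (low + 1) + 1).toNat + 2 := by omega
      rw [pvLoopA_eq (low + 1) (high - 1), h2, pvG_step]
      simp
  · rw [if_neg h]
    have h0 : (high - low + 1).toNat = 0 := by omega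
    rw [h0, pvG_zero]
termination_by (high - low + 1).toNat
decreasing_by omega

-- ===== VERDICT (by name: the statement is the Claim_ definition above) =====
theorem balanced_page_order_py_spec : Claim_equal_balanced_page_order_py := by
  intro low high _
  unfold Spec_balanced_page_order_py balanced_page_order_py
  rw [pvLoopA_eq, pvAlt_eq_pvG]
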